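-- pv_equiv track=rewrite | github.com/NLarchive/champions_tactics | url_champ.py | parse_extracted_data
-- ===== SOURCE A (Python) =====
-- def parse_extracted_data(extracted_data, fields, field_values):
--     """Parses the extracted data string and maps it to the specified fields."""
--     words = extracted_data.split()
--     data_dict = {field: [] for field in fields}
--     current_field = None
--
--     fields_lower = {field.lower(): field for field in fields}
--     field_values_lower = {
--         field: {value.lower(): value for value in values} for field, values in field_values.items()
--     }
--
--     i = 0
--     n = len(words)
--
--     while i < n:
--         word = words[i].lower()
--         if word in fields_lower:
--             current_field = fields_lower[word]
--             i += 1
--             continue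
--
--         if current_field:
--             max_words = max(len(value.split()) for value in field_values[current_field])
--             match_found = False
--
--             for window in range(max_words, 0, -1):
--                 if i + window > n:
--                     continue
--                 candidate = ' '.join(words[i:i + window]).lower()
--                 if candidate in field_values_lower[current_field]:
--                     data_dict[current_field].append(field_values_lower[current_field][candidate])
--                     i += window
--                     match_found = True
--                     break
--
--             if not match_found:
--                 i += 1
--         else:
--             i += 1
--
--     return data_dict
-- ===== SOURCE B (Python) =====
-- def parse_extracted_data(extracted_data, fields, field_values):
--     """Parses the extracted data string and maps it to the specified fields."""
--     words = extracted_data.split()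
--     n = len(words)
--     result = {field: [] for field in fields}
--     fields_lower = {field.lower(): field for field in fields}
--
--     current = None
--     i = 0
--     while i < n:
--         field = fields_lower.get(words[i].lower())
--         if field is not None:
--             current = field
--             i += 1
--             continue
--         best = None  # (value, window) — rightmost value of maximal window that matches here
--         if current is not None:
--             for value in field_values[current]:
--                 k = len(value.split())
--                 if 1 <= k <= n - i and ' '.join(words[i:i + k]).lower() == value.lower():
--                     if best is None or best[1] <= k:
--                         best = (value, k)
--         if best is None:
--             i += 1
--         else:
--             result[current].append(best[0])
--             i += best[1]
--     return result
-- ===== Notes on version B (the rewrite author's own statement) =====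
-- stated objective: alternative
-- what changed: B drops A's lowered-value lookup dicts, per-position max() recomputation and longest-first window countdown entirely: at each position it makes a single value-major pass over the current field's value list, comparing each value directly against the window of its own word count and keeping a running best (longest window, later value on ties), which is provably the same match A's hash-lookup countdown finds.
-- outside the precondition, e.g. on parse_extracted_data('Name bob x', ['Name'], {'Name': []}): A raises ValueError, B returns {'Name': []}
import Mathlib
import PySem

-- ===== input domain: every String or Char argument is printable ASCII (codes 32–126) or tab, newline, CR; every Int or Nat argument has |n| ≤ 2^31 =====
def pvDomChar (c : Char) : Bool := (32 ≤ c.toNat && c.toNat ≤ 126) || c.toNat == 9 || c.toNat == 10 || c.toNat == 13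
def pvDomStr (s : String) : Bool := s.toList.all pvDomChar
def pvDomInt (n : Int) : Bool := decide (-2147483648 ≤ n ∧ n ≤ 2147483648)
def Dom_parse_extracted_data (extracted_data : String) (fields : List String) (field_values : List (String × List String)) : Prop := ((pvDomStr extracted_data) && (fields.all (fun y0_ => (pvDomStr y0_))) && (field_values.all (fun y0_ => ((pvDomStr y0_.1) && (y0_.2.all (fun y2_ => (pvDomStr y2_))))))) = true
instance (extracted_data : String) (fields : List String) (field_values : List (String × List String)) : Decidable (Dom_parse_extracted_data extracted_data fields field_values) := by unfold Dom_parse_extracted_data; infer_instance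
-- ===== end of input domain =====

-- B replaces A's lowered-value lookup dicts, per-position max() and longest-first window countdown
-- by a single value-major pass per position that compares each value directly against the window of
-- its own word count and keeps a running best (longest window, later value on ties); same cost class.


-- ===== PORT A =====
-- fields_lower = {field.lower(): field for field in fields}
def pvFieldsLowerA (fields : List String) : PySem.Dict String String :=
  fields.foldl (fun d f => d.insert (PySem.Str.lower f) f) PySem.Dict.empty

-- field_values_lower = {field: {value.lower(): value for value in values} for field, values in field_values.items()}
def pvValuesLowerA (field_values : List (String × List String)) : PySem.Dict String (PySem.Dict String String) :=
  field_values.foldl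
    (fun d p => d.insert p.1 (p.2.foldl (fun dd v => dd.insert (PySem.Str.lower v) v) PySem.Dict.empty))
    PySem.Dict.empty

-- the inner 'for window in range(max_words, 0, -1)' loop over the remaining words `rest`
-- ('if i + window > n: continue' is the guard; break on the first candidate found in the table)
def pvScanA (lookup : PySem.Dict String String) (rest : List String) : List Int → Option (String × Int)
  | [] => none
  | w :: ws =>
    if (rest.length : Int) < w then pvScanA lookup rest ws
    else
      match lookup.get? (PySem.Str.lower (PySem.Str.join " " (PySem.List.slice rest (some 0) (some w)))) with
      | some v => some (v, w)
      | none => pvScanA lookup rest ws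

-- the 'while i < n' loop; `rest` is words[i:], fuel ≥ rest.length (each iteration advances i by ≥ 1)
def pvLoopA (fl : PySem.Dict String String) (fvd : PySem.Dict String (List String))
    (fvl : PySem.Dict String (PySem.Dict String String)) :
    Nat → List String → Option String → PySem.Dict String (List String) → PySem.Dict String (List String)
  | _, [], _, d => d
  | 0, _ :: _, _, d => d          -- unreachable with fuel ≥ rest.length
  | fuel + 1, w :: rest, cur, d =>
    match fl.get? (PySem.Str.lower w) with
    | some f => pvLoopA fl fvd fvl fuel rest (some f) d
    | none =>
      match cur with
      | some f =>
        match PySem.List.max? ((fvd.getD f []).map (fun v => ((PySem.Str.split₀ v).length : Int))) (fun x => x) with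
        | none => pvLoopA fl fvd fvl fuel rest cur d      -- Python raises ValueError here (excluded by Pre_)
        | some maxw =>
          match pvScanA (fvl.getD f PySem.Dict.empty) (w :: rest) (PySem.List.pyRange maxw 0 (-1)) with
          | some (v, win) => pvLoopA fl fvd fvl fuel ((w :: rest).drop win.toNat) cur (d.modify f [] (· ++ [v]))
          | none => pvLoopA fl fvd fvl fuel rest cur d
      | none => pvLoopA fl fvd fvl fuel rest cur d

def parse_extracted_data (extracted_data : String) (fields : List String) (field_values : List (String × List String)) : List (String × List String) :=
  let words := PySem.Str.split₀ extracted_data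
  let data0 := fields.foldl (fun d f => d.insert f ([] : List String)) PySem.Dict.empty
  (pvLoopA (pvFieldsLowerA fields) (PySem.Dict.mk field_values) (pvValuesLowerA field_values)
      words.length words none data0).items

-- ===== PORT B =====
def pvFieldsLowerB (fields : List String) : PySem.Dict String String :=
  fields.foldl (fun d f => d.insert (PySem.Str.lower f) f) PySem.Dict.empty

-- the body of B's 'for value in field_values[current]' pass: keep the running best
-- (value, window) — window = len(value.split()); later value wins on equal windows
def pvBestStep (rest : List String) (best : Option (String × Int)) (v : String) : Option (String × Int) :=
  let k : Int := ((PySem.Str.split₀ v).length : Int)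
  if 1 ≤ k ∧ k ≤ (rest.length : Int) ∧
      PySem.Str.lower (PySem.Str.join " " (PySem.List.slice rest (some 0) (some k))) = PySem.Str.lower v then
    match best with
    | none => some (v, k)
    | some (_, bk) => if bk ≤ k then some (v, k) else best
  else best

def pvBestB (rest : List String) (vals : List String) : Option (String × Int) :=
  vals.foldl (pvBestStep rest) none

-- the 'while i < n' loop; `rest` is words[i:], fuel ≥ rest.length
def pvLoopB (fl : PySem.Dict String String) (fvd : PySem.Dict String (List String)) :
    Nat → List String → Option String → PySem.Dict String (List String) → PySem.Dict String (List String)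
  | _, [], _, d => d
  | 0, _ :: _, _, d => d          -- unreachable with fuel ≥ rest.length
  | fuel + 1, w :: rest, cur, d =>
    match fl.get? (PySem.Str.lower w) with
    | some f => pvLoopB fl fvd fuel rest (some f) d
    | none =>
      match cur with
      | some f =>
        match pvBestB (w :: rest) (fvd.getD f []) with
        | some (v, k) => pvLoopB fl fvd fuel ((w :: rest).drop k.toNat) cur (d.modify f [] (· ++ [v]))
        | none => pvLoopB fl fvd fuel rest cur d
      | none => pvLoopB fl fvd fuel rest cur d

def parse_extracted_data_alt (extracted_data : String) (fields : List String) (field_values : List (String × List String)) : List (String × List String) :=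
  let words := PySem.Str.split₀ extracted_data
  let result0 := fields.foldl (fun d f => d.insert f ([] : List String)) PySem.Dict.empty
  (pvLoopB (pvFieldsLowerB fields) (PySem.Dict.mk field_values) words.length words none result0).items

-- ===== PRECONDITION & SPEC =====
-- Pre_ excludes (a) duplicate keys in field_values, where the association-list representation of a
-- Python dict is ambiguous (first-match lookup vs Python's last-wins construction), and (b) inputs on
-- which A raises KeyError/ValueError — a word resolving to a field whose field_values entry is missing
-- or empty, immediately followed by a non-field word (this test slightly over-excludes: the bad field
-- word may instead be consumed inside a matched multi-word value, in which case A still returns).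
def Pre_parse_extracted_data (extracted_data : String) (fields : List String) (field_values : List (String × List String)) : Prop :=
  (field_values.map Prod.fst).Nodup ∧
  ((List.range ((PySem.Str.split₀ extracted_data).length - 1)).all (fun i =>
    match (fields.filter (fun g => PySem.Str.lower g == PySem.Str.lower ((PySem.Str.split₀ extracted_data).getD i ""))).getLast? with
    | some f =>
      !(fields.all (fun g => PySem.Str.lower g != PySem.Str.lower ((PySem.Str.split₀ extracted_data).getD (i+1) ""))) ||
      !((PySem.Dict.mk field_values).getD f []).isEmpty
    | none => true)) = true

instance (extracted_data : String) (fields : List String) (field_values : List (String × List String)) : Decidable (Pre_parse_extracted_data extracted_data fields field_values) := by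
  unfold Pre_parse_extracted_data; infer_instance

def pvWitness_parse_extracted_data : String × List String × (List (String × List String)) :=
  ("Name bob smith", ["name"], [("name", ["Bob Smith"])])

def Spec_parse_extracted_data (extracted_data : String) (fields : List String) (field_values : List (String × List String)) (out : List (String × List String)) : Prop := out = parse_extracted_data_alt extracted_data fields field_values
instance (extracted_data : String) (fields : List String) (field_values : List (String × List String)) (out : List (String × List String)) : Decidable (Spec_parse_extracted_data extracted_data fields field_values out) := by unfold Spec_parse_extracted_data; infer_instance

-- ===== CLAIM (what is proved, stated in full; the proofs are below) =====
def Claim_equal_parse_extracted_data : Prop := ∀ (extracted_data : String) (fields : List String) (field_values : List (String × List String)), Dom_parse_extracted_data extracted_data fields field_values → Pre_parse_extracted_data extracted_data fields field_values → Spec_parse_extracted_data extracted_data fields field_values (parse_extracted_data extracted_data fields field_values)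

-- ===== LEMMAS AND PROOFS =====

theorem pv_isspace_lowerChar (c : Char) :
    PySem.Chars.isspace (PySem.Chars.lowerChar c) = PySem.Chars.isspace c := by
  unfold PySem.Chars.lowerChar
  split
  · next h =>
    simp only [PySem.Chars.isupper, Bool.and_eq_true, decide_eq_true_eq] at h
    have hA : 65 ≤ c.toNat := h.1
    have hZ : c.toNat ≤ 90 := h.2
    have hv : (c.toNat + 32).isValidChar := Or.inl (by omega)
    have ht : (Char.ofNat (c.toNat + 32)).toNat = c.toNat + 32 := by
      rw [Char.toNat_ofNat, if_pos hv]
    have h1 : PySem.Chars.isspace (Char.ofNat (c.toNat + 32)) = false := by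
      simp only [PySem.Chars.isspace, ht]
      simp only [Bool.or_eq_false_iff, Bool.and_eq_false_iff, decide_eq_false_iff_not]
      omega
    have h2 : PySem.Chars.isspace c = false := by
      simp only [PySem.Chars.isspace]
      simp only [Bool.or_eq_false_iff, Bool.and_eq_false_iff, decide_eq_false_iff_not]
      omega
    rw [h1, h2]
  · rfl

theorem pv_split₀_go_map (f : Char → Char) (hf : ∀ c, PySem.Chars.isspace (f c) = PySem.Chars.isspace c) :
    ∀ (cs cur : List Char) (acc : List (List Char)),
      PySem.Chars.split₀.go (cs.map f) (cur.map f) (acc.map (List.map f)) =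
        (PySem.Chars.split₀.go cs cur acc).map (List.map f) := by
  intro cs
  induction cs with
  | nil =>
    intro cur acc
    simp only [List.map_nil, PySem.Chars.split₀.go, List.isEmpty_map]
    split <;> simp
  | cons c cs ih =>
    intro cur acc
    simp only [List.map_cons, PySem.Chars.split₀.go, hf c]
    by_cases hs : PySem.Chars.isspace c
    · simp only [hs, if_true]
      by_cases h : cur.isEmpty
      · have h' : (cur.map f).isEmpty = true := by
          rw [List.isEmpty_iff] at *; simp [h]
        simp only [h, h', if_true]
        exact ih [] acc
      · have h' : (cur.map f).isEmpty = false := by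
          simp only [List.isEmpty_eq_false_iff] at *; simpa using h
        simp only [Bool.not_eq_true] at h
        simp only [h, h', if_false, Bool.false_eq_true]
        have := ih [] (cur.reverse :: acc)
        simpa using this
    · simp only [Bool.not_eq_true] at hs
      simp only [hs, if_false, Bool.false_eq_true]
      exact ih (c :: cur) acc

theorem pv_intercalate_eq (ws : List (List Char)) (w : List Char) :
    List.intercalate [' '] (w :: ws) = w ++ ws.flatMap (fun u => ' ' :: u) := by
  induction ws generalizing w with
  | nil => simp [List.intercalate]
  | cons u ws ih =>
    rw [List.intercalate, List.intersperse_cons₂, List.flatten_cons, List.flatten_cons]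
    rw [show (List.intersperse [' '] (u :: ws)).flatten = List.intercalate [' '] (u :: ws) from rfl, ih u]
    simp

def pvPl (w : List Char) : Prop := w ≠ [] ∧ ∀ c ∈ w, PySem.Chars.isspace c = false

theorem pv_go_P :
    ∀ (cs cur : List Char) (acc : List (List Char)),
      (∀ w ∈ acc, ∀ c ∈ w, PySem.Chars.isspace c = false) →
      (∀ w ∈ acc, w ≠ []) →
      (∀ c ∈ cur, PySem.Chars.isspace c = false) →
      ∀ w ∈ PySem.Chars.split₀.go cs cur acc, pvPl w := by
  intro cs
  induction cs with
  | nil =>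
    intro cur acc hacc hne hcur w hw
    rw [PySem.Chars.split₀.go] at hw
    split at hw
    · rw [List.mem_reverse] at hw
      exact ⟨hne w hw, hacc w hw⟩
    · next h =>
      rw [List.mem_reverse] at hw
      rcases List.mem_cons.mp hw with rfl | hw
      · refine ⟨by simpa using List.isEmpty_eq_false_iff.mp (Bool.not_eq_true _ ▸ (by simpa using h)), ?_⟩
        intro c hc
        exact hcur c (List.mem_reverse.mp hc)
      · exact ⟨hne w hw, hacc w hw⟩
  | cons c cs ih =>
    intro cur acc hacc hne hcur w hw
    rw [PySem.Chars.split₀.go] at hw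
    by_cases hs : PySem.Chars.isspace c
    · rw [if_pos hs] at hw
      split at hw
      · exact ih [] acc hacc hne (by simp) w hw
      · next h =>
        refine ih [] (cur.reverse :: acc) ?_ ?_ (by simp) w hw
        · intro u hu c' hc'
          rcases List.mem_cons.mp hu with rfl | hu
          · exact hcur c' (List.mem_reverse.mp hc')
          · exact hacc u hu c' hc'
        · intro u hu
          rcases List.mem_cons.mp hu with rfl | hu
          · simpa using List.isEmpty_eq_false_iff.mp (by simpa using h)
          · exact hne u hu
    · rw [if_neg hs] at hw
      refine ih (c :: cur) acc hacc hne ?_ w hw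
      intro x hx
      rcases List.mem_cons.mp hx with rfl | hx
      · simpa using hs
      · exact hcur x hx

theorem pv_split₀_Pl (cs : List Char) : ∀ w ∈ PySem.Chars.split₀ cs, pvPl w :=
  fun w hw => pv_go_P cs [] [] (by simp) (by simp) (by simp) w hw

theorem pv_go_consume (w : List Char) (hw : ∀ c ∈ w, PySem.Chars.isspace c = false) :
    ∀ (cs cur : List Char) (acc : List (List Char)),
      PySem.Chars.split₀.go (w ++ cs) cur acc = PySem.Chars.split₀.go cs (w.reverse ++ cur) acc := by
  induction w with
  | nil => intro cs cur acc; simp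
  | cons c w ih =>
    intro cs cur acc
    have hc : PySem.Chars.isspace c = false := hw c (List.mem_cons_self ..)
    rw [List.cons_append, PySem.Chars.split₀.go, if_neg (by simp [hc]),
      ih (fun x hx => hw x (List.mem_cons_of_mem _ hx))]
    simp

theorem pv_go_tail (ws : List (List Char))
    (hP : ∀ w ∈ ws, pvPl w) :
    ∀ (cur : List Char) (acc : List (List Char)), cur ≠ [] →
      PySem.Chars.split₀.go (ws.flatMap (fun u => ' ' :: u)) cur acc =
        acc.reverse ++ (cur.reverse :: ws) := by
  induction ws with
  | nil =>
    intro cur acc hcur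
    rw [List.flatMap_nil, PySem.Chars.split₀.go, if_neg (by simp [hcur])]
    simp
  | cons w ws ih =>
    intro cur acc hcur
    obtain ⟨hw1, hw2⟩ := hP w (List.mem_cons_self ..)
    rw [List.flatMap_cons, List.cons_append, PySem.Chars.split₀.go,
      if_pos (by decide), if_neg (by simp [hcur]),
      pv_go_consume w hw2, List.append_nil,
      ih (fun u hu => hP u (List.mem_cons_of_mem _ hu)) _ _ (by simpa using hw1)]
    simp

theorem pv_split₀_join (ws : List (List Char))
    (hP : ∀ w ∈ ws, pvPl w) :
    PySem.Chars.split₀ (PySem.Chars.join [' '] ws) = ws := by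
  cases ws with
  | nil => rfl
  | cons w ws =>
    obtain ⟨hw1, hw2⟩ := hP w (List.mem_cons_self ..)
    unfold PySem.Chars.join
    rw [pv_intercalate_eq, PySem.Chars.split₀, pv_go_consume w hw2, List.append_nil,
      pv_go_tail ws (fun u hu => hP u (List.mem_cons_of_mem _ hu)) _ _ (by simpa using hw1)]
    simp

theorem pv_split₀_lower (cs : List Char) :
    PySem.Chars.split₀ (cs.map PySem.Chars.lowerChar) =
      (PySem.Chars.split₀ cs).map (List.map PySem.Chars.lowerChar) := by
  have := pv_split₀_go_map PySem.Chars.lowerChar pv_isspace_lowerChar cs [] []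
  simpa [PySem.Chars.split₀] using this

def pvP (w : String) : Prop := pvPl w.toList

def pvCand (rest : List String) (k : Nat) : String :=
  PySem.Str.lower (PySem.Str.join " " (PySem.List.slice rest (some 0) (some (k : Int))))

theorem pvF1 {rest : List String} (hP : ∀ w ∈ rest, pvP w) {v : String} {k : Nat}
    (hk : k ≤ rest.length) (hv : pvCand rest k = PySem.Str.lower v) :
    (PySem.Str.split₀ v).length = k := by
  have hslice : PySem.List.slice rest (some (0 : Int)) (some (k : Int)) = rest.take k := by
    have h0 := PySem.List.slice_natCast rest 0 k
    rw [List.drop_zero, Nat.sub_zero] at h0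
    exact_mod_cast h0
  have htl : PySem.Chars.lower v.toList =
      PySem.Chars.lower (PySem.Chars.join [' '] ((rest.take k).map String.toList)) := by
    have h := congrArg String.toList hv.symm
    unfold pvCand at h
    rw [PySem.Str.toList_lower, PySem.Str.toList_lower, PySem.Str.toList_join, hslice,
      show (" ".toList) = [' '] from rfl] at h
    exact h
  set wls := (rest.take k).map String.toList with hwls
  have hPw : ∀ w ∈ wls, pvPl w := by
    intro w hw
    obtain ⟨u, hu, rfl⟩ := List.mem_map.mp hw
    exact hP u (List.mem_of_mem_take hu)
  have e1 : (PySem.Chars.split₀ v.toList).length =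
      (PySem.Chars.split₀ (PySem.Chars.lower v.toList)).length := by
    unfold PySem.Chars.lower
    rw [pv_split₀_lower, List.length_map]
  have e2 : PySem.Chars.split₀ (PySem.Chars.lower (PySem.Chars.join [' '] wls)) =
      wls.map (List.map PySem.Chars.lowerChar) := by
    unfold PySem.Chars.lower
    rw [pv_split₀_lower, pv_split₀_join wls hPw]
  have : (PySem.Str.split₀ v).length = (PySem.Chars.split₀ v.toList).length := by
    rw [← PySem.Str.split₀_map_toList, List.length_map]
  rw [this, e1, htl, e2, List.length_map, hwls, List.length_map, List.length_take]
  omega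

theorem pv_split₀_P (s : String) : ∀ w ∈ PySem.Str.split₀ s, pvP w := by
  intro w hw
  unfold pvP
  exact pv_split₀_Pl s.toList w.toList
    (by rw [← PySem.Str.split₀_map_toList]; exact List.mem_map_of_mem hw)

-- the lowered ' '.join candidate both ports compare against, as a named abbreviation
theorem pvCand_eq (rest : List String) (k : Nat) :
    PySem.Str.lower (PySem.Str.join " " (PySem.List.slice rest (some 0) (some ((k : Nat) : Int)))) =
      pvCand rest k := rfl

-- the LAST value of vals whose lowering is s (= what A's last-wins dict lookup returns)
def pvLast (vals : List String) (s : String) : Option String :=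
  vals.reverse.find? (fun v => PySem.Str.lower v == s)

-- canonical spec: scan windows m, m-1, ..., 1; first window with a matching value wins
def pvG (rest vals : List String) : Nat → Option (String × Int)
  | 0 => none
  | k + 1 =>
    match pvLast vals (pvCand rest (k + 1)) with
    | some v => some (v, ((k + 1 : Nat) : Int))
    | none => pvG rest vals k

-- pvG with A's 'i + window > n: continue' guard
def pvGg (rest vals : List String) : Nat → Option (String × Int)
  | 0 => none
  | k + 1 =>
    if rest.length < k + 1 then pvGg rest vals k
    else
      match pvLast vals (pvCand rest (k + 1)) with
      | some v => some (v, ((k + 1 : Nat) : Int))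
      | none => pvGg rest vals k

theorem pvLast_append (vals : List String) (v : String) (s : String) :
    pvLast (vals ++ [v]) s = if PySem.Str.lower v == s then some v else pvLast vals s := by
  simp only [pvLast, List.reverse_append, List.reverse_cons, List.reverse_nil, List.nil_append,
    List.cons_append, List.nil_append, List.find?_cons]
  split <;> simp_all

theorem pvLast_some {vals : List String} {s : String} {v : String}
    (h : pvLast vals s = some v) : v ∈ vals ∧ PySem.Str.lower v = s := by
  unfold pvLast at h
  refine ⟨List.mem_reverse.mp (List.mem_of_find?_eq_some h), ?_⟩
  have := List.find?_some h
  simpa using this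

-- A's dict {value.lower(): value} looks up as "last matching value"
theorem pvDictLast (vals : List String) (s : String) :
    (vals.foldl (fun dd v => dd.insert (PySem.Str.lower v) v) PySem.Dict.empty).get? s =
      pvLast vals s := by
  induction vals using List.reverseRecOn with
  | nil => rfl
  | append_singleton vals v ih =>
    rw [List.foldl_append, List.foldl_cons, List.foldl_nil, pvLast_append]
    by_cases h : PySem.Str.lower v = s
    · subst h; simp [PySem.Dict.get?_insert_self]
    · rw [PySem.Dict.get?_insert_of_ne, ih, if_neg (by simpa using h)]
      intro he; exact h he.symm

theorem pvG_nil (rest : List String) : ∀ m, pvG rest [] m = none := by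
  intro m; induction m with
  | zero => rfl
  | succ k ih => simp [pvG, pvLast, ih]

theorem pvG_le {rest vals : List String} :
    ∀ {m : Nat} {v : String} {j : Int}, pvG rest vals m = some (v, j) → 1 ≤ j ∧ j ≤ (m : Int) := by
  intro m
  induction m with
  | zero => intro v j h; simp [pvG] at h
  | succ k ih =>
    intro v j h
    rw [pvG] at h
    cases hl : pvLast vals (pvCand rest (k + 1)) with
    | some w =>
      rw [hl] at h
      simp only [Option.some.injEq, Prod.mk.injEq] at h
      obtain ⟨-, h2⟩ := h
      subst h2
      constructor <;> [push_cast; push_cast] <;> omega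
    | none =>
      rw [hl] at h
      have := ih h
      push_cast at *
      omega

-- appending a value that matches nowhere in 1..m leaves pvG unchanged
theorem pvG_app_notgood {rest vals : List String} {v : String}
    (h : ∀ k, 1 ≤ k → k ≤ rest.length → pvCand rest k ≠ PySem.Str.lower v) :
    ∀ m, m ≤ rest.length → pvG rest (vals ++ [v]) m = pvG rest vals m := by
  intro m
  induction m with
  | zero => intro _; rfl
  | succ k ih =>
    intro hm
    rw [pvG, pvG, pvLast_append,
      if_neg (by simp only [beq_iff_eq]; exact fun he => (h (k+1) (by omega) hm he.symm).elim),
      ih (by omega)]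

-- appending a value that matches exactly at its own window kv combines as B's step does
theorem pvG_app_good {rest vals : List String} {v : String} {kv : Nat}
    (hk1 : 1 ≤ kv) (hcand : pvCand rest kv = PySem.Str.lower v)
    (huniq : ∀ k, 1 ≤ k → k ≤ rest.length → pvCand rest k = PySem.Str.lower v → k = kv) :
    ∀ m, m ≤ rest.length → kv ≤ m →
      pvG rest (vals ++ [v]) m =
        match pvG rest vals m with
        | none => some (v, (kv : Int))
        | some (w, j) => if j ≤ (kv : Int) then some (v, (kv : Int)) else some (w, j) := by
  intro m
  induction m with
  | zero => intro _ h; omega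
  | succ k ih =>
    intro hm hkv
    by_cases he : k + 1 = kv
    · subst he
      rw [pvG, pvLast_append, if_pos (by simpa using hcand.symm)]
      rw [pvG]
      cases hl : pvLast vals (pvCand rest (k + 1)) with
      | some w => simp
      | none =>
        cases hg : pvG rest vals k with
        | none => simp
        | some p =>
          obtain ⟨w, j⟩ := p
          have := pvG_le hg
          simp only
          rw [if_pos (by push_cast at *; omega)]
    · have hne : pvCand rest (k+1) ≠ PySem.Str.lower v := fun hc => he (huniq _ (by omega) hm hc)
      rw [pvG, pvLast_append, if_neg (by simpa using fun h => hne h.symm)]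
      rw [pvG]
      cases hl : pvLast vals (pvCand rest (k + 1)) with
      | some w =>
        have hjk : ¬ (((k+1 : Nat) : Int) ≤ (kv : Int)) := by push_cast; omega
        simp only
        rw [if_neg hjk]
      | none =>
        simp only
        exact ih (by omega) (by omega)

-- B's fold equals pvG at the full window range
theorem pvBestB_eq_pvG {rest : List String} (hP : ∀ w ∈ rest, pvP w) (vals : List String) :
    pvBestB rest vals = pvG rest vals rest.length := by
  induction vals using List.reverseRecOn with
  | nil => rw [pvG_nil]; rfl
  | append_singleton vals v ih =>
    rw [pvBestB, List.foldl_append, List.foldl_cons, List.foldl_nil,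
      show vals.foldl (pvBestStep rest) none = pvBestB rest vals from rfl, ih]
    unfold pvBestStep
    by_cases hC : 1 ≤ (((PySem.Str.split₀ v).length : Int)) ∧
        ((PySem.Str.split₀ v).length : Int) ≤ (rest.length : Int) ∧
        PySem.Str.lower (PySem.Str.join " "
          (PySem.List.slice rest (some 0) (some ((PySem.Str.split₀ v).length : Int)))) = PySem.Str.lower v
    · obtain ⟨h1, h2, h3⟩ := hC
      have hcand : pvCand rest (PySem.Str.split₀ v).length = PySem.Str.lower v := h3
      have huniq : ∀ k, 1 ≤ k → k ≤ rest.length →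
          pvCand rest k = PySem.Str.lower v → k = (PySem.Str.split₀ v).length :=
        fun k _ hk hc => (pvF1 hP hk hc).symm
      rw [pvG_app_good (by exact_mod_cast h1) hcand huniq rest.length le_rfl (by exact_mod_cast h2),
        if_pos ⟨h1, h2, h3⟩]
      cases pvG rest vals rest.length with
      | none => rfl
      | some p => obtain ⟨w, j⟩ := p; rfl
    · rw [if_neg hC, pvG_app_notgood ?hng rest.length le_rfl]
      case hng =>
        intro k hk1 hk2 hc
        have hkeq : k = (PySem.Str.split₀ v).length := (pvF1 hP hk2 hc).symm
        subst hkeq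
        exact (hC ⟨by exact_mod_cast hk1, by exact_mod_cast hk2, hc⟩).elim

-- A's guarded countdown scan, through the last-wins dict, equals the guarded spec scan
theorem pvScanA_eq_pvGg (vals rest : List String) :
    ∀ m : Nat,
      pvScanA (vals.foldl (fun dd v => dd.insert (PySem.Str.lower v) v) PySem.Dict.empty) rest
        (PySem.List.pyRange ((m : Nat) : Int) 0 (-1)) = pvGg rest vals m := by
  intro m
  induction m with
  | zero => rw [PySem.List.pyRange_neg_one_eq_nil (by norm_num)]; rfl
  | succ k ih =>
    rw [PySem.List.pyRange_neg_one_cons (by push_cast; omega), pvScanA,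
      show (((k + 1 : Nat) : Int) - 1) = ((k : Nat) : Int) by push_cast; ring,
      pvDictLast, pvCand_eq, pvGg]
    by_cases hg : rest.length < k + 1
    · rw [if_pos (by exact_mod_cast hg), if_pos hg]
      cases hl : pvLast vals (pvCand rest (k + 1)) <;> exact ih
    · rw [if_neg (by push_cast at *; omega), if_neg hg]
      cases hl : pvLast vals (pvCand rest (k + 1)) with
      | some w => rfl
      | none => exact ih

theorem pvGg_clamp (rest vals : List String) :
    ∀ m, rest.length ≤ m → pvGg rest vals m = pvGg rest vals rest.length := by
  intro m
  induction m with
  | zero => intro h; rw [Nat.le_zero.mp h]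
  | succ k ih =>
    intro h
    by_cases he : rest.length = k + 1
    · rw [he]
    · rw [pvGg, if_pos (by omega), ih (by omega)]

theorem pvGg_eq_pvG (rest vals : List String) :
    ∀ m, m ≤ rest.length → pvGg rest vals m = pvG rest vals m := by
  intro m
  induction m with
  | zero => intro _; rfl
  | succ k ih =>
    intro h
    rw [pvGg, if_neg (by omega), pvG]
    cases pvLast vals (pvCand rest (k+1)) with
    | some w => rfl
    | none => exact ih (by omega)

-- pvG does not change above the largest value word count
theorem pvG_ext_top {rest vals : List String} (hP : ∀ w ∈ rest, pvP w) {Mn : Nat}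
    (hM : ∀ v ∈ vals, (PySem.Str.split₀ v).length ≤ Mn) :
    ∀ m, Mn ≤ m → m ≤ rest.length → pvG rest vals m = pvG rest vals Mn := by
  intro m
  induction m with
  | zero => intro h1 _; rw [Nat.le_zero.mp h1]
  | succ k ih =>
    intro h1 h2
    by_cases he : Mn = k + 1
    · rw [he]
    · have hnone : pvLast vals (pvCand rest (k+1)) = none := by
        cases hl : pvLast vals (pvCand rest (k+1)) with
        | none => rfl
        | some v =>
          obtain ⟨hmem, hlow⟩ := pvLast_some hl
          have hf := pvF1 hP (k := k+1) h2 hlow.symm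
          have := hM v hmem
          omega
      rw [pvG, hnone, ih (by omega) (by omega)]

-- the full A-side match expression (max over word counts, then countdown scan) equals B's best fold
theorem pvScan_eq_pvBest {rest : List String} (hP : ∀ w ∈ rest, pvP w) (vals : List String) :
    (match PySem.List.max? (vals.map (fun v => ((PySem.Str.split₀ v).length : Int))) (fun x => x) with
     | none => none
     | some maxw =>
        pvScanA (vals.foldl (fun dd v => dd.insert (PySem.Str.lower v) v) PySem.Dict.empty) rest
          (PySem.List.pyRange maxw 0 (-1))) = pvBestB rest vals := by
  cases hm : PySem.List.max? (vals.map (fun v => ((PySem.Str.split₀ v).length : Int))) (fun x => x) with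
  | none =>
    have hnil : vals = [] := by
      have := (PySem.List.max?_eq_none_iff (vals.map (fun v => ((PySem.Str.split₀ v).length : Int))) (fun x => x)).mp hm
      simpa using this
    subst hnil; rfl
  | some M =>
    have hmem := PySem.List.max?_mem hm
    obtain ⟨v0, hv0, hM0⟩ := List.mem_map.mp hmem
    have hMn : M = ((M.toNat : Nat) : Int) := by omega
    have hmax : ∀ v ∈ vals, (PySem.Str.split₀ v).length ≤ M.toNat := by
      intro v hv
      have := PySem.List.max?_isMax hm _ (List.mem_map_of_mem hv)
      simp only at this
      omega
    show pvScanA (vals.foldl (fun dd v => dd.insert (PySem.Str.lower v) v) PySem.Dict.empty) rest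
        (PySem.List.pyRange M 0 (-1)) = pvBestB rest vals
    rw [pvBestB_eq_pvG hP, hMn, pvScanA_eq_pvGg]
    by_cases hc : M.toNat ≤ rest.length
    · rw [pvGg_eq_pvG _ _ _ hc, pvG_ext_top hP hmax rest.length hc le_rfl]
    · rw [pvGg_clamp _ _ _ (by omega), pvGg_eq_pvG _ _ _ le_rfl]

-- first-match association lookups through a fold of inserts from distinct keys
theorem pvFoldInsert_get?_of_not_mem {β : Type} (g : String × List String → β)
    (l : List (String × List String)) (d : PySem.Dict String β) (f : String)
    (h : ∀ p ∈ l, (p.1 == f) = false) :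
    (l.foldl (fun d p => d.insert p.1 (g p)) d).get? f = d.get? f := by
  induction l generalizing d with
  | nil => rfl
  | cons p l ih =>
    have hp : (p.1 == f) = false := h p (List.mem_cons_self ..)
    rw [List.foldl_cons, ih _ (fun q hq => h q (List.mem_cons_of_mem _ hq)),
      PySem.Dict.get?_insert_of_ne]
    intro he; rw [he] at hp; simp at hp

theorem pvFoldInsert_get?_eq_find? {β : Type} (g : String × List String → β)
    (l : List (String × List String)) (d : PySem.Dict String β) (f : String)
    (hnd : (l.map Prod.fst).Nodup) :
    (l.foldl (fun d p => d.insert p.1 (g p)) d).get? f =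
      match l.find? (fun p => p.1 == f) with
      | some p => some (g p)
      | none => d.get? f := by
  induction l generalizing d with
  | nil => rfl
  | cons p l ih =>
    rw [List.map_cons, List.nodup_cons] at hnd
    rw [List.foldl_cons, List.find?_cons]
    by_cases hpf : (p.1 == f) = true
    · rw [hpf]
      dsimp only
      have hf : f = p.1 := (eq_of_beq hpf).symm
      rw [pvFoldInsert_get?_of_not_mem]
      · rw [hf, PySem.Dict.get?_insert_self]
      · intro q hq
        by_contra hb
        rw [Bool.not_eq_false] at hb
        exact hnd.1 (hf ▸ (eq_of_beq hb) ▸ List.mem_map_of_mem hq)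
    · rw [Bool.not_eq_true] at hpf
      rw [hpf]
      dsimp only
      rw [ih _ hnd.2, PySem.Dict.get?_insert_of_ne]
      intro he; rw [he] at hpf; simp at hpf

-- under distinct keys, A's nested lowered dict for f is the lowered dict of field_values[f]
theorem pvValuesLower_getD (field_values : List (String × List String))
    (hnd : (field_values.map Prod.fst).Nodup) (f : String) :
    (pvValuesLowerA field_values).getD f PySem.Dict.empty =
      ((PySem.Dict.mk field_values).getD f []).foldl
        (fun dd v => dd.insert (PySem.Str.lower v) v) PySem.Dict.empty := by
  have hA := pvFoldInsert_get?_eq_find?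
    (fun p => p.2.foldl (fun dd v => dd.insert (PySem.Str.lower v) v) PySem.Dict.empty)
    field_values PySem.Dict.empty f hnd
  rw [show pvValuesLowerA field_values = field_values.foldl (fun d p => d.insert p.1
      (p.2.foldl (fun dd v => dd.insert (PySem.Str.lower v) v) PySem.Dict.empty)) PySem.Dict.empty from rfl]
  cases hfind : field_values.find? (fun p => p.1 == f) with
  | none =>
    rw [hfind] at hA
    rw [PySem.Dict.getD, hA]
    have : (PySem.Dict.mk field_values).getD f [] = [] := by
      rw [PySem.Dict.getD, show (PySem.Dict.mk field_values).get? f =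
        Option.map Prod.snd (field_values.find? (fun p => p.1 == f)) from rfl, hfind]
      rfl
    rw [this]
    rfl
  | some p =>
    rw [hfind] at hA
    rw [PySem.Dict.getD, hA]
    have : (PySem.Dict.mk field_values).getD f [] = p.2 := by
      rw [PySem.Dict.getD, show (PySem.Dict.mk field_values).get? f =
        Option.map Prod.snd (field_values.find? (fun p => p.1 == f)) from rfl, hfind]
      rfl
    rw [this]
    rfl

-- ---------- the loop correspondence ----------

theorem pvLoop_eq (fields : List String) (field_values : List (String × List String))
    (hnd : (field_values.map Prod.fst).Nodup) :
    ∀ (fuel : Nat) (rest : List String) (cur : Option String) (d : PySem.Dict String (List String)),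
      (∀ w ∈ rest, pvP w) →
      pvLoopA (pvFieldsLowerA fields) (PySem.Dict.mk field_values) (pvValuesLowerA field_values) fuel rest cur d =
        pvLoopB (pvFieldsLowerA fields) (PySem.Dict.mk field_values) fuel rest cur d := by
  intro fuel
  induction fuel with
  | zero => intro rest cur d _; cases rest <;> rfl
  | succ n ih =>
    intro rest cur d hP
    cases rest with
    | nil => rfl
    | cons w rest =>
      have hPrest : ∀ u ∈ rest, pvP u := fun u hu => hP u (List.mem_cons_of_mem _ hu)
      simp only [pvLoopA, pvLoopB]
      cases hf : (pvFieldsLowerA fields).get? (PySem.Str.lower w) with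
      | some f => exact ih rest (some f) d hPrest
      | none =>
        dsimp only
        cases cur with
        | none => exact ih rest none d hPrest
        | some f =>
          dsimp only
          rw [pvValuesLower_getD field_values hnd f]
          have hscan := pvScan_eq_pvBest hP ((PySem.Dict.mk field_values).getD f [])
          cases hm : PySem.List.max? (((PySem.Dict.mk field_values).getD f []).map
              (fun v => ((PySem.Str.split₀ v).length : Int))) (fun x => x) with
          | none =>
            rw [hm] at hscan
            have hb : pvBestB (w :: rest) ((PySem.Dict.mk field_values).getD f []) = none :=
              hscan.symm
            rw [hb]
            exact ih rest (some f) d hPrest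
          | some M =>
            rw [hm] at hscan
            have hs : pvScanA
                (((PySem.Dict.mk field_values).getD f []).foldl
                  (fun dd v => dd.insert (PySem.Str.lower v) v) PySem.Dict.empty) (w :: rest)
                (PySem.List.pyRange M 0 (-1)) =
                pvBestB (w :: rest) ((PySem.Dict.mk field_values).getD f []) := hscan
            show (match pvScanA
                (((PySem.Dict.mk field_values).getD f []).foldl
                  (fun dd v => dd.insert (PySem.Str.lower v) v) PySem.Dict.empty) (w :: rest)
                (PySem.List.pyRange M 0 (-1)) with
              | some (v, win) =>
                pvLoopA (pvFieldsLowerA fields) (PySem.Dict.mk field_values) (pvValuesLowerA field_values) n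
                  ((w :: rest).drop win.toNat) (some f) (d.modify f [] (· ++ [v]))
              | none =>
                pvLoopA (pvFieldsLowerA fields) (PySem.Dict.mk field_values) (pvValuesLowerA field_values) n
                  rest (some f) d) = _
            rw [hs]
            cases pvBestB (w :: rest) ((PySem.Dict.mk field_values).getD f []) with
            | none => exact ih rest (some f) d hPrest
            | some p =>
              obtain ⟨v, k⟩ := p
              exact ih _ (some f) _ (fun u hu => hP u (List.mem_of_mem_drop hu))

-- ===== VERDICT (by name: the statement is the Claim_ definition above) =====
theorem parse_extracted_data_spec : Claim_equal_parse_extracted_data := by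
  intro extracted_data fields field_values _ hPre
  unfold Spec_parse_extracted_data
  rw [parse_extracted_data, parse_extracted_data_alt]
  have hB : pvFieldsLowerB = pvFieldsLowerA := rfl
  rw [hB]
  exact congrArg PySem.Dict.items
    (pvLoop_eq fields field_values hPre.1 _ _ _ _ (pv_split₀_P extracted_data))
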